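-- pv_equiv track=rewrite | github.com/liangyuRain/fsociety-notebook | prep_session_17_11_09/test.py | solution
-- ===== SOURCE A (Python) =====
-- def solution(s):
--     s = [ord(ch) - ord('a') for ch in s]
--     opt = [s[i] for i in range(len(s))]
--     for j in range(len(s)):
--         ptr = s[j] - 1
--         for i in reversed(range(j)):
--             if s[i] < s[j]:
--                 opt[j] = min(opt[j], opt[i] + max(0, ptr - s[i]))
--                 if s[i] == ptr:
--                     ptr -= 1
--     ptr = 25
--     minCost = 26
--     for j in reversed(range(len(s))):
--         minCost = min(minCost, opt[j] + max(0, ptr - s[j]))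
--         if s[j] == ptr:
--             ptr -= 1
--     return minCost
-- ===== SOURCE B (Python) =====
-- def solution(s):
--     # Top-down memoized recursion; each row is computed in two clean passes:
--     # precompute the pointer sequence into an array, then take a forward
--     # guarded min.  A's trailing backward scan is just row(len(vals), 26).
--     vals = [ord(ch) - ord('a') for ch in s]
--     memo = {}
--
--     def row(j, v):
--         # pass 1: the pointer value in effect at each index i < j
--         p = v - 1
--         rev = []
--         for i in reversed(range(j)):
--             rev.append(p)
--             if vals[i] == p:
--                 p -= 1
--         ptrs = rev[::-1]
--         # pass 2: forward min over admissible predecessors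
--         best = v
--         for i in range(j):
--             if vals[i] < v:
--                 best = min(best, opt(i) + max(0, ptrs[i] - vals[i]))
--         return best
--
--     def opt(i):
--         if i not in memo:
--             memo[i] = row(i, vals[i])
--         return memo[i]
--
--     return row(len(vals), 26)
-- ===== Notes on version B (the rewrite author's own statement) =====
-- stated objective: alternative
-- what changed: B replaces A's bottom-up nested backward stateful scans by top-down memoized recursion whose row is computed in two separate passes - the pointer sequence is precomputed into an array and the min is then taken in a forward guarded pass - and A's trailing backward scan becomes the same row function applied to the virtual value 26 (equality for characters at or above that bound is proved, not assumed).
import Mathlib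
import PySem

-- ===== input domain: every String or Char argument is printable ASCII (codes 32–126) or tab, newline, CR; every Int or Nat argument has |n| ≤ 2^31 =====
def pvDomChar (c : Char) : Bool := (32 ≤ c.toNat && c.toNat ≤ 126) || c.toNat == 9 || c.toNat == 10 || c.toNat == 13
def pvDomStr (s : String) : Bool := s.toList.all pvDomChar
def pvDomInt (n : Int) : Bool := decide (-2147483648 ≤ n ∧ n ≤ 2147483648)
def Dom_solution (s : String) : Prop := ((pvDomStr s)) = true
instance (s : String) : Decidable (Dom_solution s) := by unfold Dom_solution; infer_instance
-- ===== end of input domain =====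

-- B recomputes the DP top-down with memoization, each row in two passes (precomputed pointer
-- array, then a forward guarded min); A's trailing backward scan becomes the row for the
-- virtual value 26.  Objective: alternative (same asymptotic cost, different decomposition).

-- ===== PORT A =====
def solution (s : String) : Int :=
  let sl : List Int := s.toList.map (fun ch => (ch.toNat : Int) - 97)
  let opt0 : List Int := (List.range sl.length).map (fun i => sl.getD i 0)
  let opt : List Int := (List.range sl.length).foldl (fun (opt : List Int) (j : Nat) =>
    ((List.range j).reverse.foldl (fun (st : List Int × Int) (i : Nat) =>
      if sl.getD i 0 < sl.getD j 0 then
        (st.1.set j (min (st.1.getD j 0) (st.1.getD i 0 + max 0 (st.2 - sl.getD i 0))),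
         if sl.getD i 0 = st.2 then st.2 - 1 else st.2)
      else st) (opt, sl.getD j 0 - 1)).1) opt0
  ((List.range sl.length).reverse.foldl (fun (st : Int × Int) (j : Nat) =>
    (min st.1 (opt.getD j 0 + max 0 (st.2 - sl.getD j 0)),
     if sl.getD j 0 = st.2 then st.2 - 1 else st.2)) (26, 25)).1

-- ===== PORT B =====
-- B-side helper: pass 1 of row — the pointer value in effect at each index i < j
-- (Python builds rev by appending while scanning i = j-1 .. 0, then reverses it).
def pvPtrs (vals : List Int) (j : Nat) (p : Int) : List Int :=
  (((List.range j).reverse.foldl (fun (st : List Int × Int) (i : Nat) =>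
      (st.1 ++ [st.2], if vals.getD i 0 = st.2 then st.2 - 1 else st.2))
    ([], p)).1).reverse

-- B-side helper: one row (pass 1 then pass 2); `opt` is the memo of already-finished rows.
def pvBrow (vals : List Int) (j : Nat) (v : Int) (opt : List Int) : Int :=
  let ptrs := pvPtrs vals j (v - 1)
  (List.range j).foldl (fun (best : Int) (i : Nat) =>
    if vals.getD i 0 < v then
      min best (opt.getD i 0 + max 0 (ptrs.getD i 0 - vals.getD i 0))
    else best) v

-- B-side helper: the memo table; Source B's memoized recursion fills memo[0], memo[1], …
-- in exactly this increasing order (row's pass 2 requests opt(i) for i ascending).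
def pvBmemo (vals : List Int) : Nat → List Int
  | 0 => []
  | j + 1 => let m := pvBmemo vals j
             m ++ [pvBrow vals j (vals.getD j 0) m]

def solution_alt (s : String) : Int :=
  let vals : List Int := s.toList.map (fun ch => (ch.toNat : Int) - 97)
  pvBrow vals vals.length 26 (pvBmemo vals vals.length)

-- ===== PRECONDITION & SPEC =====
def Spec_solution (s : String) (out : Int) : Prop := out = solution_alt s
instance (s : String) (out : Int) : Decidable (Spec_solution s out) := by unfold Spec_solution; infer_instance

-- ===== CLAIM (what is proved, stated in full; the proofs are below) =====
def Claim_equal_solution : Prop := ∀ (s : String), Dom_solution s → Spec_solution s (solution s)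

-- ===== LEMMAS AND PROOFS =====

-- Abstract DP layer: one row update of the guarded DP (guard vals[k] < v).
def pvRowStep (vals D : List Int) (v : Int) (st : Int × Int) (k : Nat) : Int × Int :=
  if vals.getD k 0 < v then
    (min st.1 (D.getD k 0 + max 0 (st.2 - vals.getD k 0)),
     if vals.getD k 0 = st.2 then st.2 - 1 else st.2)
  else st

-- A's final pass step (unconditional).
def pvFinStep (vals D : List Int) (st : Int × Int) (k : Nat) : Int × Int :=
  (min st.1 (D.getD k 0 + max 0 (st.2 - vals.getD k 0)),
   if vals.getD k 0 = st.2 then st.2 - 1 else st.2)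

def pvRow (vals D : List Int) (j : Nat) : Int :=
  ((List.range j).reverse.foldl (pvRowStep vals D (vals.getD j 0))
    (vals.getD j 0, vals.getD j 0 - 1)).1

def pvDP (vals : List Int) : Nat → List Int
  | 0 => []
  | j+1 => pvDP vals j ++ [pvRow vals (pvDP vals j) j]

lemma pvDP_length (vals : List Int) (j : Nat) : (pvDP vals j).length = j := by
  induction j with
  | zero => rfl
  | succ j ih => simp [pvDP, ih]

lemma pv_foldl_congr {α β : Type} (l : List β) (f g : α → β → α) (s : α)
    (h : ∀ b ∈ l, ∀ a, f a b = g a b) : l.foldl f s = l.foldl g s := by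
  induction l generalizing s with
  | nil => rfl
  | cons x xs ih =>
    simp only [List.foldl_cons]
    rw [h x (by simp)]
    exact ih _ (fun b hb a => h b (by simp [hb]) a)

lemma pv_set_getD_self (l : List Int) (j : Nat) : l.set j (l.getD j 0) = l := by
  rcases lt_or_ge j l.length with h | h
  · simp [List.getD, List.getElem?_eq_getElem h, List.set_getElem_self]
  · simp [List.set_eq_of_length_le h]

lemma pvDP_getD_stable (vals : List Int) (j m k : Nat) (hk : k < j) (hjm : j ≤ m) :
    (pvDP vals m).getD k 0 = (pvDP vals j).getD k 0 := by
  induction m with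
  | zero => omega
  | succ m ih =>
    rcases Nat.eq_or_lt_of_le hjm with h | h
    · rw [h]
    · have hjm' : j ≤ m := by omega
      have hk' : k < m := by omega
      show ((pvDP vals m) ++ _).getD k 0 = _
      rw [List.getD_append _ _ _ _ (by rw [pvDP_length]; exact hk'), ih hjm']

lemma pvRow_congr (vals vals' D D' : List Int) (j : Nat)
    (hv : ∀ k, k ≤ j → vals.getD k 0 = vals'.getD k 0)
    (hD : ∀ k, k < j → D.getD k 0 = D'.getD k 0) :
    pvRow vals D j = pvRow vals' D' j := by
  unfold pvRow
  rw [hv j le_rfl]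
  congr 1
  apply pv_foldl_congr
  intro i hi st
  have hij : i < j := by simpa using hi
  unfold pvRowStep
  rw [hv i (by omega), hD i hij]

lemma pvRowStep_fst_le (vals D : List Int) (v : Int) (ks : List Nat) (st : Int × Int) :
    (ks.foldl (pvRowStep vals D v) st).1 ≤ st.1 := by
  induction ks generalizing st with
  | nil => exact le_rfl
  | cons k ks ih =>
    refine le_trans (ih _) ?_
    unfold pvRowStep
    split
    · exact min_le_left _ _
    · exact le_rfl

lemma pvRowStep_snd_le (vals D : List Int) (v : Int) (ks : List Nat) (st : Int × Int) :
    (ks.foldl (pvRowStep vals D v) st).2 ≤ st.2 := by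
  induction ks generalizing st with
  | nil => exact le_rfl
  | cons k ks ih =>
    refine le_trans (ih _) ?_
    unfold pvRowStep
    split
    · dsimp only
      split <;> omega
    · exact le_rfl

lemma pvFin_min_out (vals D : List Int) (ks : List Nat) (mc c p : Int) :
    ks.foldl (pvFinStep vals D) (min mc c, p) =
      (min (ks.foldl (pvFinStep vals D) (mc, p)).1 c,
       (ks.foldl (pvFinStep vals D) (mc, p)).2) := by
  induction ks generalizing mc p with
  | nil => rfl
  | cons k ks ih =>
    simp only [List.foldl_cons]
    have h1 : pvFinStep vals D (min mc c, p) k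
        = (min (min mc (D.getD k 0 + max 0 (p - vals.getD k 0))) c,
           (pvFinStep vals D (mc, p) k).2) := by
      unfold pvFinStep
      dsimp only
      rw [min_right_comm]
    rw [h1]
    have h2 : pvFinStep vals D (mc, p) k
        = (min mc (D.getD k 0 + max 0 (p - vals.getD k 0)),
           (pvFinStep vals D (mc, p) k).2) := rfl
    rw [h2]
    exact ih _ _

lemma pvM (vals D : List Int) (ks : List Nat) (v bI pI mc pF Ans : Int)
    (hv : 26 ≤ v) (hpF : pF ≤ 25) (hpp : pF ≤ pI)
    (hAns : Ans = (ks.foldl (pvRowStep vals D 26) (mc, pF)).1)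
    (hb : Ans ≤ bI)
    (hD : ∀ k ∈ ks, 26 ≤ vals.getD k 0 → Ans ≤ D.getD k 0) :
    Ans ≤ (ks.foldl (pvRowStep vals D v) (bI, pI)).1 := by
  induction ks generalizing bI pI mc pF with
  | nil => simpa using hb
  | cons k ks ih =>
    have hD' : ∀ k' ∈ ks, 26 ≤ vals.getD k' 0 → Ans ≤ D.getD k' 0 :=
      fun k' hk' => hD k' (List.mem_cons_of_mem _ hk')
    simp only [List.foldl_cons] at hAns ⊢
    by_cases hw : vals.getD k 0 < 26
    · -- the unguarded-vs-guarded distinction is invisible here: both rows process k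
      have hwv : vals.getD k 0 < v := by omega
      rw [pvRowStep, if_pos hw] at hAns
      rw [pvRowStep, if_pos hwv]
      have hAnsF : Ans ≤ min mc (D.getD k 0 + max 0 (pF - vals.getD k 0)) := by
        rw [hAns]; exact pvRowStep_fst_le _ _ _ _ _
      have htF : Ans ≤ D.getD k 0 + max 0 (pF - vals.getD k 0) :=
        le_trans hAnsF (min_le_right _ _)
      refine ih _ _ (min mc (D.getD k 0 + max 0 (pF - vals.getD k 0)))
          (if vals.getD k 0 = pF then pF - 1 else pF) ?_ ?_ hAns ?_ hD'
      · split <;> omega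
      · dsimp only
        split_ifs <;> omega
      · dsimp only
        refine le_min hb (le_trans htF ?_)
        have : max 0 (pF - vals.getD k 0) ≤ max 0 (pI - vals.getD k 0) := by omega
        omega
    · -- vals[k] ≥ 26: the guarded reference row skips k
      rw [pvRowStep, if_neg hw] at hAns
      by_cases hwv : vals.getD k 0 < v
      · rw [pvRowStep, if_pos hwv]
        refine ih _ _ mc pF hpF ?_ hAns ?_ hD'
        · dsimp only
          split_ifs <;> omega
        · dsimp only
          refine le_min hb ?_
          have hd : Ans ≤ D.getD k 0 := hD k (List.mem_cons_self) (by omega)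
          have : (0:Int) ≤ max 0 (pI - vals.getD k 0) := le_max_left _ _
          omega
      · rw [pvRowStep, if_neg hwv]
        exact ih _ _ mc pF hpF hpp hAns hb hD'

lemma pvDP_getD_row (vals : List Int) (n j : Nat) (hj : j < n) :
    (pvDP vals n).getD j 0 = pvRow vals (pvDP vals n) j := by
  rw [pvDP_getD_stable vals (j+1) n j (by omega) (by omega)]
  show ((pvDP vals j) ++ [pvRow vals (pvDP vals j) j]).getD j 0 = _
  rw [List.getD_append_right _ _ _ _ (by rw [pvDP_length])]
  rw [pvDP_length]
  simp only [Nat.sub_self, List.getD_cons_zero]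
  exact pvRow_congr _ _ _ _ _ (fun k _ => rfl)
    (fun k hk => (pvDP_getD_stable vals (k+1) n k (by omega) (by omega)).symm ▸
      (pvDP_getD_stable vals (k+1) j k (by omega) (by omega)).symm ▸ rfl)

lemma pv_range_split (n j : Nat) (h : j ≤ n) :
    (List.range n).reverse
      = ((List.range (n - j)).map (j + ·)).reverse ++ (List.range j).reverse := by
  rw [← List.reverse_append]
  have h1 : n = j + (n - j) := by omega
  rw [h1, List.range_add, Nat.add_sub_cancel_left]

lemma pvL (vals : List Int) : ∀ j, j < vals.length → 26 ≤ vals.getD j 0 →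
    ((List.range vals.length).reverse.foldl
        (pvRowStep vals (pvDP vals vals.length) 26) (26, 25)).1
      ≤ (pvDP vals vals.length).getD j 0 := by
  intro j
  induction j using Nat.strong_induction_on with
  | _ j ih =>
    intro hj h26
    rw [pvDP_getD_row vals vals.length j hj]
    unfold pvRow
    have hfold : (List.range vals.length).reverse.foldl
          (pvRowStep vals (pvDP vals vals.length) 26) (26, 25)
        = (List.range j).reverse.foldl (pvRowStep vals (pvDP vals vals.length) 26)
            (((List.range (vals.length - j)).map (j + ·)).reverse.foldl
              (pvRowStep vals (pvDP vals vals.length) 26) (26, 25)) := by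
      rw [pv_range_split vals.length j (le_of_lt hj), List.foldl_append]
    have hmid2 : (((List.range (vals.length - j)).map (j + ·)).reverse.foldl
        (pvRowStep vals (pvDP vals vals.length) 26) (26, 25)).2 ≤ 25 :=
      pvRowStep_snd_le _ _ _ _ _
    refine pvM vals (pvDP vals vals.length) ((List.range j).reverse) (vals.getD j 0)
      (vals.getD j 0) (vals.getD j 0 - 1)
      (((List.range (vals.length - j)).map (j + ·)).reverse.foldl
        (pvRowStep vals (pvDP vals vals.length) 26) (26, 25)).1
      (((List.range (vals.length - j)).map (j + ·)).reverse.foldl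
        (pvRowStep vals (pvDP vals vals.length) 26) (26, 25)).2
      _ h26 hmid2 (by omega) ?_ ?_ ?_
    · rw [hfold]
    · have : ((List.range vals.length).reverse.foldl
          (pvRowStep vals (pvDP vals vals.length) 26) (26, 25)).1 ≤ 26 :=
        pvRowStep_fst_le _ _ _ _ _
      omega
    · intro k hk h26k
      have hkj : k < j := by simpa using hk
      exact ih k hkj (by omega) h26k

lemma pvE (vals D : List Int) (ks : List Nat) (mc p : Int) (hp : p ≤ 25)
    (hD : ∀ k ∈ ks, 26 ≤ vals.getD k 0 →
        (ks.foldl (pvRowStep vals D 26) (mc, p)).1 ≤ D.getD k 0) :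
    (ks.foldl (pvFinStep vals D) (mc, p)).1
      = (ks.foldl (pvRowStep vals D 26) (mc, p)).1 := by
  induction ks generalizing mc p with
  | nil => rfl
  | cons k ks ih =>
    simp only [List.foldl_cons] at hD ⊢
    by_cases hw : vals.getD k 0 < 26
    · rw [pvRowStep, if_pos hw] at hD ⊢
      have hstep : pvFinStep vals D (mc, p) k
          = (min mc (D.getD k 0 + max 0 (p - vals.getD k 0)),
             if vals.getD k 0 = p then p - 1 else p) := rfl
      rw [hstep]
      refine ih _ _ (by split <;> omega)
        (fun k' hk' h => hD k' (List.mem_cons_of_mem _ hk') h)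
    · rw [pvRowStep, if_neg hw] at hD ⊢
      have hw26 : 26 ≤ vals.getD k 0 := by omega
      have hne : ¬ vals.getD k 0 = p := by omega
      have hmax : max 0 (p - vals.getD k 0) = 0 := by omega
      have hstep : pvFinStep vals D (mc, p) k = (min mc (D.getD k 0), p) := by
        rw [pvFinStep]
        dsimp only
        rw [hmax, if_neg hne, add_zero]
      rw [hstep, pvFin_min_out]
      dsimp only
      rw [ih mc p hp (fun k' hk' h => hD k' (List.mem_cons_of_mem _ hk') h)]
      exact min_eq_left (hD k List.mem_cons_self hw26)

lemma pvCore (vals : List Int) :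
    ((List.range vals.length).reverse.foldl
        (pvFinStep vals (pvDP vals vals.length)) (26, 25)).1
      = ((List.range vals.length).reverse.foldl
          (pvRowStep vals (pvDP vals vals.length) 26) (26, 25)).1 := by
  refine pvE _ _ _ _ _ (by omega) ?_
  intro k hk h26
  have hkn : k < vals.length := by simpa using hk
  exact pvL vals k hkn h26

lemma pv_map_range_getD (l : List Int) :
    (List.range l.length).map (fun i => l.getD i 0) = l := by
  apply List.ext_getElem
  · simp
  · intro i h1 h2
    simp [List.getD, List.getElem?_eq_getElem h2]

lemma pv_set_append (l1 l2 : List Int) (x : Int) :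
    (l1 ++ l2).set l1.length x = l1 ++ l2.set 0 x := by
  rw [List.set_append_right _ _ (le_refl l1.length), Nat.sub_self]

lemma pvA_inner (sl o : List Int) (j : Nat) (hj : j < o.length) :
    ∀ (ks : List Nat), (∀ i ∈ ks, i < j) → ∀ (b p : Int),
    ks.foldl (fun (st : List Int × Int) (i : Nat) =>
      if sl.getD i 0 < sl.getD j 0 then
        (st.1.set j (min (st.1.getD j 0) (st.1.getD i 0 + max 0 (st.2 - sl.getD i 0))),
         if sl.getD i 0 = st.2 then st.2 - 1 else st.2)
      else st) (o.set j b, p)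
    = (o.set j (ks.foldl (pvRowStep sl o (sl.getD j 0)) (b, p)).1,
       (ks.foldl (pvRowStep sl o (sl.getD j 0)) (b, p)).2) := by
  intro ks
  induction ks with
  | nil => intro _ b p; rfl
  | cons i ks ih =>
    intro hks b p
    have hij : i < j := hks i List.mem_cons_self
    simp only [List.foldl_cons]
    by_cases hc : sl.getD i 0 < sl.getD j 0
    · rw [if_pos hc, pvRowStep, if_pos hc]
      dsimp only
      have h1 : (o.set j b).getD j 0 = b := by
        simp [List.getD, hj]
      have h2 : (o.set j b).getD i 0 = o.getD i 0 := by
        simp [List.getD, List.getElem?_set_ne (by omega : j ≠ i)]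
      rw [h1, h2, List.set_set]
      exact ih (fun i' hi' => hks i' (List.mem_cons_of_mem _ hi')) _ _
    · rw [if_neg hc, pvRowStep, if_neg hc]
      exact ih (fun i' hi' => hks i' (List.mem_cons_of_mem _ hi')) _ _

lemma pvA_outer (sl : List Int) : ∀ (m : Nat), m ≤ sl.length →
    (List.range m).foldl (fun (opt : List Int) (j : Nat) =>
      ((List.range j).reverse.foldl (fun (st : List Int × Int) (i : Nat) =>
        if sl.getD i 0 < sl.getD j 0 then
          (st.1.set j (min (st.1.getD j 0) (st.1.getD i 0 + max 0 (st.2 - sl.getD i 0))),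
           if sl.getD i 0 = st.2 then st.2 - 1 else st.2)
        else st) (opt, sl.getD j 0 - 1)).1) sl
    = pvDP sl m ++ sl.drop m := by
  intro m
  induction m with
  | zero => simp [pvDP]
  | succ m ih =>
    intro hm
    have hm' : m < sl.length := by omega
    rw [List.range_succ, List.foldl_append, ih (by omega)]
    simp only [List.foldl_cons, List.foldl_nil]
    have hlen : m < (pvDP sl m ++ sl.drop m).length := by
      simp only [List.length_append, pvDP_length, List.length_drop]; omega
    have hb : (pvDP sl m ++ sl.drop m).getD m 0 = sl.getD m 0 := by
      rw [List.getD_append_right _ _ _ _ (by rw [pvDP_length]), pvDP_length, Nat.sub_self,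
        List.drop_eq_getElem_cons hm']
      simp [List.getD, List.getElem?_eq_getElem hm']
    conv_lhs => rw [← pv_set_getD_self (pvDP sl m ++ sl.drop m) m]
    rw [pvA_inner sl (pvDP sl m ++ sl.drop m) m hlen (List.range m).reverse
      (fun i hi => by simpa using hi) _ _]
    dsimp only
    have hcongr : (List.range m).reverse.foldl
        (pvRowStep sl (pvDP sl m ++ sl.drop m) (sl.getD m 0))
        ((pvDP sl m ++ sl.drop m).getD m 0, sl.getD m 0 - 1)
      = (List.range m).reverse.foldl (pvRowStep sl (pvDP sl m) (sl.getD m 0))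
        (sl.getD m 0, sl.getD m 0 - 1) := by
      rw [hb]
      apply pv_foldl_congr
      intro i hi st
      have him : i < m := by simpa using hi
      unfold pvRowStep
      rw [List.getD_append _ _ _ _ (by rw [pvDP_length]; exact him)]
    rw [hcongr]
    have hfront : (pvDP sl m ++ sl.drop m).length = sl.length := by
      simp only [List.length_append, pvDP_length, List.length_drop]; omega
    have hset := pv_set_append (pvDP sl m) (sl.drop m)
      ((List.range m).reverse.foldl (pvRowStep sl (pvDP sl m) (sl.getD m 0))
        (sl.getD m 0, sl.getD m 0 - 1)).1
    rw [pvDP_length] at hset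
    rw [hset, List.drop_eq_getElem_cons hm', List.set_cons_zero]
    show pvDP sl m ++ pvRow sl (pvDP sl m) m :: sl.drop (m+1) = _
    rw [pvDP]
    simp

-- ===== B-side bridge: the two-pass forward row equals the backward stateful row =====

-- the raw rev-building fold of pvPtrs
def pvRevP (vals : List Int) (ks : List Nat) (l : List Int) (p : Int) : List Int × Int :=
  ks.foldl (fun (st : List Int × Int) (i : Nat) =>
    (st.1 ++ [st.2], if vals.getD i 0 = st.2 then st.2 - 1 else st.2)) (l, p)

lemma pvRevP_acc (vals : List Int) (ks : List Nat) :
    ∀ (l : List Int) (p : Int),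
      pvRevP vals ks l p = (l ++ (pvRevP vals ks [] p).1, (pvRevP vals ks [] p).2) := by
  induction ks with
  | nil => intro l p; simp [pvRevP]
  | cons k ks ih =>
    intro l p
    show pvRevP vals ks (l ++ [p]) _ = _
    rw [ih (l ++ [p])]
    conv_rhs => rw [show pvRevP vals (k :: ks) [] p = pvRevP vals ks [p] _ from rfl, ih [p]]
    simp

lemma pvRevP_length (vals : List Int) (ks : List Nat) (p : Int) :
    (pvRevP vals ks [] p).1.length = ks.length := by
  induction ks generalizing p with
  | nil => rfl
  | cons k ks ih =>
    show (pvRevP vals ks [p] _).1.length = _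
    rw [pvRevP_acc]
    simp [ih]

lemma pvPtrs_succ (vals : List Int) (j : Nat) (p : Int) :
    pvPtrs vals (j + 1) p
      = pvPtrs vals j (if vals.getD j 0 = p then p - 1 else p) ++ [p] := by
  unfold pvPtrs
  rw [show (List.range (j + 1)).reverse = j :: (List.range j).reverse from by
    rw [List.range_succ]; simp]
  show ((pvRevP vals (List.range j).reverse [p] _).1).reverse = _
  rw [pvRevP_acc]
  simp [pvRevP]

lemma pvPtrs_length (vals : List Int) (j : Nat) (p : Int) :
    (pvPtrs vals j p).length = j := by
  unfold pvPtrs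
  rw [List.length_reverse]
  show (pvRevP vals (List.range j).reverse [] p).1.length = _
  rw [pvRevP_length]
  simp

-- folding min-updates commutes with a pending min on the accumulator
lemma pv_fwd_min_out (vals : List Int) (v : Int) (cand : Nat → Int) (ks : List Nat) :
    ∀ (b c : Int),
      ks.foldl (fun (best : Int) (i : Nat) =>
          if vals.getD i 0 < v then min best (cand i) else best) (min b c)
        = min (ks.foldl (fun (best : Int) (i : Nat) =>
            if vals.getD i 0 < v then min best (cand i) else best) b) c := by
  induction ks with
  | nil => intro b c; rfl
  | cons k ks ih =>
    intro b c
    simp only [List.foldl_cons]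
    by_cases h : vals.getD k 0 < v
    · rw [if_pos h, if_pos h, min_right_comm, ih]
    · rw [if_neg h, if_neg h, ih]

-- the backward stateful scan equals the forward pass over the precomputed pointer array
lemma pvBF (vals D : List Int) (v : Int) :
    ∀ (j : Nat) (b p : Int), p < v →
    ((List.range j).reverse.foldl (pvRowStep vals D v) (b, p)).1
      = (List.range j).foldl (fun (best : Int) (i : Nat) =>
          if vals.getD i 0 < v then
            min best (D.getD i 0 + max 0 ((pvPtrs vals j p).getD i 0 - vals.getD i 0))
          else best) b := by
  intro j
  induction j with
  | zero => intro b p _; rfl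
  | succ j ih =>
    intro b p hp
    have hrev : (List.range (j + 1)).reverse = j :: (List.range j).reverse := by
      rw [List.range_succ]; simp
    set p' : Int := if vals.getD j 0 = p then p - 1 else p with hp'def
    have hp' : p' < v := by rw [hp'def]; split <;> omega
    have hstep : pvRowStep vals D v (b, p) j
        = (if vals.getD j 0 < v then min b (D.getD j 0 + max 0 (p - vals.getD j 0)) else b,
           p') := by
      unfold pvRowStep
      by_cases h : vals.getD j 0 < v
      · rw [if_pos h, if_pos h]
      · rw [if_neg h, if_neg h, hp'def, if_neg (by omega)]
    have hL : ((List.range (j + 1)).reverse.foldl (pvRowStep vals D v) (b, p)).1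
        = ((List.range j).reverse.foldl (pvRowStep vals D v)
            (if vals.getD j 0 < v then min b (D.getD j 0 + max 0 (p - vals.getD j 0)) else b,
             p')).1 := by
      rw [hrev, List.foldl_cons, hstep]
    rw [hL, ih _ _ hp']
    -- RHS side
    rw [List.range_succ, List.foldl_append, List.foldl_cons, List.foldl_nil, pvPtrs_succ]
    rw [← hp'def]
    have hlen : (pvPtrs vals j p').length = j := pvPtrs_length _ _ _
    have hgetj : (pvPtrs vals j p' ++ [p]).getD j 0 = p := by
      rw [List.getD_append_right _ _ _ _ (by rw [hlen]), hlen, Nat.sub_self]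
      rfl
    have hcongr : ∀ (b0 : Int),
        (List.range j).foldl (fun (best : Int) (i : Nat) =>
          if vals.getD i 0 < v then
            min best (D.getD i 0 + max 0 ((pvPtrs vals j p' ++ [p]).getD i 0 - vals.getD i 0))
          else best) b0
        = (List.range j).foldl (fun (best : Int) (i : Nat) =>
          if vals.getD i 0 < v then
            min best (D.getD i 0 + max 0 ((pvPtrs vals j p').getD i 0 - vals.getD i 0))
          else best) b0 := by
      intro b0
      apply pv_foldl_congr
      intro i hi a
      have hij : i < j := by simpa using hi
      rw [List.getD_append _ _ _ _ (by rw [hlen]; exact hij)]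
    rw [hcongr, hgetj]
    by_cases h : vals.getD j 0 < v
    · rw [if_pos h, if_pos h, pv_fwd_min_out]
    · rw [if_neg h, if_neg h]

lemma pvBrow_eq_pvRow (vals D : List Int) (j : Nat) :
    pvBrow vals j (vals.getD j 0) D = pvRow vals D j := by
  unfold pvBrow pvRow
  rw [pvBF vals D (vals.getD j 0) j (vals.getD j 0) (vals.getD j 0 - 1) (by omega)]

lemma pvBmemo_eq (vals : List Int) : ∀ (j : Nat), pvBmemo vals j = pvDP vals j := by
  intro j
  induction j with
  | zero => rfl
  | succ j ih =>
    show pvBmemo vals j ++ [pvBrow vals j (vals.getD j 0) (pvBmemo vals j)]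
        = pvDP vals j ++ [pvRow vals (pvDP vals j) j]
    rw [ih, pvBrow_eq_pvRow]

theorem solution_spec : Claim_equal_solution := by
  intro s _
  unfold Spec_solution solution solution_alt
  dsimp only
  rw [pv_map_range_getD, pvA_outer _ _ le_rfl, List.drop_length, List.append_nil,
    pvBmemo_eq]
  rw [show pvBrow (s.toList.map (fun ch => ((ch.toNat : Int) - 97)))
        (s.toList.map (fun ch => ((ch.toNat : Int) - 97))).length 26
        (pvDP (s.toList.map (fun ch => ((ch.toNat : Int) - 97)))
          (s.toList.map (fun ch => ((ch.toNat : Int) - 97))).length)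
      = ((List.range (s.toList.map (fun ch => ((ch.toNat : Int) - 97))).length).reverse.foldl
          (pvRowStep (s.toList.map (fun ch => ((ch.toNat : Int) - 97)))
            (pvDP (s.toList.map (fun ch => ((ch.toNat : Int) - 97)))
              (s.toList.map (fun ch => ((ch.toNat : Int) - 97))).length) 26) (26, 25)).1 from by
    unfold pvBrow
    rw [pvBF _ _ 26 _ 26 25 (by omega)]
    norm_num]
  exact pvCore _
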